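-- pv_equiv track=rewrite | github.com/brunofaria27/graph-disjoint-paths | Application/debug.py | looping_aux
-- ===== SOURCE A (Python) =====
-- def looping_aux(start, end):
--     edges = list()
--     for i in range(start, end):
--         for j in range(start, end):
--             if i != j and [i, j] not in edges and [j, i] not in edges:
--                 edges.append([i, j])
--                 edges.append([j, i])
--     return edges
-- ===== SOURCE B (Python) =====
-- def looping_aux(start, end):
--     # Stage 1: enumerate each unordered pair (i, j) with i < j once.
--     combos = [(i, j) for i in range(start, end) for j in range(i + 1, end)]
--     # Stage 2: expand every pair into its two orientations.
--     return [edge for i, j in combos for edge in ([i, j], [j, i])]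
-- ===== Notes on version B (the rewrite author's own statement) =====
-- stated objective: alternative
-- what changed: Replaces A's single nested loop with list-membership tests by two staged passes: first enumerate each unordered pair (i,j) with i<j once as a combinations list, then expand every pair into both orientations, so no membership test is needed.
import Mathlib
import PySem

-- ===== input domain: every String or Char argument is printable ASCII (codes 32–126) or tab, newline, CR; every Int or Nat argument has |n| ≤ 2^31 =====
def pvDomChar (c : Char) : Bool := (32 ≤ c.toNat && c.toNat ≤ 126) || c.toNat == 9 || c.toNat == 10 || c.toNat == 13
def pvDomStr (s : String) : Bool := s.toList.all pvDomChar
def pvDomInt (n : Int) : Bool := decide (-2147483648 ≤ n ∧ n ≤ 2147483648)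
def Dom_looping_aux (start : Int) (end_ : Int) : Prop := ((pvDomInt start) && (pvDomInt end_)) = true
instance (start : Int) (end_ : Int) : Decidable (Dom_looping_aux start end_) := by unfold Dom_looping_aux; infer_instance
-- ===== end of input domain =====

-- B builds the result in two staged passes — the list of unordered pairs once, then the
-- expansion of each pair into both orientations — so it needs no membership tests.

-- ===== PORT A =====
def looping_aux (start : Int) (end_ : Int) : List (List Int) :=
  (PySem.List.pyRange start end_ 1).foldl (fun edges i =>
    (PySem.List.pyRange start end_ 1).foldl (fun edges j =>
      if i ≠ j ∧ [i, j] ∉ edges ∧ [j, i] ∉ edges then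
        (edges ++ [[i, j]]) ++ [[j, i]]
      else edges) edges) []

-- ===== PORT B =====
def looping_aux_alt (start : Int) (end_ : Int) : List (List Int) :=
  let combos : List (Int × Int) :=
    (PySem.List.pyRange start end_ 1).flatMap (fun i =>
      (PySem.List.pyRange (i + 1) end_ 1).map (fun j => (i, j)))
  combos.flatMap (fun p => [[p.1, p.2], [p.2, p.1]])

-- ===== PRECONDITION & SPEC =====
def Spec_looping_aux (start : Int) (end_ : Int) (out : List (List Int)) : Prop := out = looping_aux_alt start end_
instance (start : Int) (end_ : Int) (out : List (List Int)) : Decidable (Spec_looping_aux start end_ out) := by unfold Spec_looping_aux; infer_instance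

-- ===== CLAIM (what is proved, stated in full; the proofs are below) =====
def Claim_equal_looping_aux : Prop := ∀ (start : Int) (end_ : Int), Dom_looping_aux start end_ → Spec_looping_aux start end_ (looping_aux start end_)

-- ===== LEMMAS AND PROOFS =====

-- A's inner loop over js, for fixed outer i: when every smaller j already has its pair
-- present and no pair with a larger j is present, it appends exactly the pairs of i with
-- the larger elements of js, in order.
lemma inner_eq (i : Int) : ∀ (js : List Int) (E : List (List Int)),
    js.Nodup →
    (∀ j ∈ js, j < i → [j, i] ∈ E) →
    (∀ j ∈ js, i < j → [i, j] ∉ E ∧ [j, i] ∉ E) →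
    js.foldl (fun edges j =>
      if i ≠ j ∧ [i, j] ∉ edges ∧ [j, i] ∉ edges then
        (edges ++ [[i, j]]) ++ [[j, i]]
      else edges) E
    = E ++ (js.filter (fun j => decide (i < j))).flatMap (fun j => [[i, j], [j, i]]) := by
  intro js
  induction js with
  | nil => intro E _ _ _; simp
  | cons j js ih =>
    intro E hnd h1 h2
    rcases List.nodup_cons.mp hnd with ⟨hj, hnd'⟩
    rcases lt_trichotomy i j with hij | hij | hij
    · -- i < j : pair not yet present, gets appended
      have hnot := h2 j (by simp) hij
      simp only [List.foldl_cons]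
      rw [if_pos ⟨by omega, hnot.1, hnot.2⟩]
      have step := ih ((E ++ [[i, j]]) ++ [[j, i]]) hnd'
        (fun j' hj' hlt => by
          have := h1 j' (by simp [hj']) hlt
          simp [this])
        (fun j' hj' hlt => by
          have := h2 j' (by simp [hj']) hlt
          have hne : j' ≠ j := fun h => hj (h ▸ hj')
          constructor
          · simp only [List.mem_append, List.mem_singleton]
            push Not
            refine ⟨⟨this.1, ?_⟩, ?_⟩ <;> simp <;> omega
          · simp only [List.mem_append, List.mem_singleton]
            push Not
            refine ⟨⟨this.2, ?_⟩, ?_⟩ <;> simp <;> omega)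
      rw [step]
      simp [hij]
    · -- i = j : skipped
      simp only [List.foldl_cons]
      rw [if_neg (by simp [hij])]
      rw [ih E hnd' (fun j' hj' => h1 j' (by simp [hj'])) (fun j' hj' => h2 j' (by simp [hj']))]
      simp [hij]
    · -- j < i : pair already present, skipped
      have hmem := h1 j (by simp) hij
      simp only [List.foldl_cons]
      rw [if_neg (by simp [hmem])]
      rw [ih E hnd' (fun j' hj' => h1 j' (by simp [hj'])) (fun j' hj' => h2 j' (by simp [hj']))]
      have : ¬ (i < j) := by omega
      simp [this]

-- filtering a step-1 range for elements > m keeps exactly the range from m+1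
lemma filter_gt_pyRange (m s e : Int) (hs : s ≤ m + 1) :
    (PySem.List.pyRange s e 1).filter (fun j => decide (m < j)) = PySem.List.pyRange (m + 1) e 1 := by
  by_cases he : m + 1 ≤ e
  · rw [PySem.List.pyRange_one_append s (m + 1) e hs he, List.filter_append]
    rw [List.filter_eq_nil_iff.mpr (fun x hx => by
      have := (PySem.List.mem_pyRange_one).mp hx
      simp; omega)]
    rw [List.filter_eq_self.mpr (fun x hx => by
      have := (PySem.List.mem_pyRange_one).mp hx
      simp; omega)]
    simp
  · rw [PySem.List.pyRange_one_eq_nil (a := m + 1) (b := e) (by omega)]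
    exact List.filter_eq_nil_iff.mpr (fun x hx => by
      have := (PySem.List.mem_pyRange_one).mp hx
      simp; omega)

lemma mem_pairs (i e a b : Int) :
    [a, b] ∈ (PySem.List.pyRange (i + 1) e 1).flatMap (fun j => [[i, j], [j, i]]) ↔
      ((a = i ∧ i + 1 ≤ b ∧ b < e) ∨ (b = i ∧ i + 1 ≤ a ∧ a < e)) := by
  simp only [List.mem_flatMap, PySem.List.mem_pyRange_one]
  constructor
  · rintro ⟨j, hj, hmem⟩
    simp only [List.mem_cons, List.cons.injEq, List.not_mem_nil, or_false] at hmem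
    rcases hmem with ⟨ha, hb, -⟩ | ⟨ha, hb, -⟩
    · exact Or.inl ⟨ha, hb ▸ hj.1, hb ▸ hj.2⟩
    · exact Or.inr ⟨hb, ha ▸ hj.1, ha ▸ hj.2⟩
  · rintro (⟨ha, hb1, hb2⟩ | ⟨hb, ha1, ha2⟩)
    · exact ⟨b, ⟨hb1, hb2⟩, by simp [ha]⟩
    · exact ⟨a, ⟨ha1, ha2⟩, by simp [hb]⟩

-- A's outer loop from m, with accumulator E containing exactly the pairs whose minimum
-- was already processed, produces E followed by the pairs of the remaining range.
lemma outer_eq (s e : Int) : ∀ (n : Nat) (m : Int), (e - m).toNat = n → s ≤ m →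
    ∀ E : List (List Int),
    (∀ a b : Int, [a, b] ∈ E ↔ (s ≤ a ∧ a < e ∧ s ≤ b ∧ b < e ∧ a ≠ b ∧ min a b < m)) →
    (PySem.List.pyRange m e 1).foldl (fun edges i =>
      (PySem.List.pyRange s e 1).foldl (fun edges j =>
        if i ≠ j ∧ [i, j] ∉ edges ∧ [j, i] ∉ edges then
          (edges ++ [[i, j]]) ++ [[j, i]]
        else edges) edges) E
    = E ++ (PySem.List.pyRange m e 1).flatMap
        (fun i => (PySem.List.pyRange (i + 1) e 1).flatMap (fun j => [[i, j], [j, i]])) := by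
  intro n
  induction n with
  | zero =>
    intro m hn _ E _
    rw [PySem.List.pyRange_one_eq_nil (a := m) (b := e) (by omega)]
    simp
  | succ n ih =>
    intro m hn hsm E hE
    have hme : m < e := by omega
    rw [PySem.List.pyRange_one_cons hme]
    simp only [List.foldl_cons]
    have hinner := inner_eq m (PySem.List.pyRange s e 1) E
      (PySem.List.nodup_pyRange_one s e)
      (fun j hj hlt => by
        have hjr := (PySem.List.mem_pyRange_one).mp hj
        exact (hE j m).mpr (by omega))
      (fun j hj hlt => by
        have hjr := (PySem.List.mem_pyRange_one).mp hj
        constructor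
        · intro h; have := (hE m j).mp h; omega
        · intro h; have := (hE j m).mp h; omega)
    rw [hinner, filter_gt_pyRange m s e (by omega)]
    have hstep := ih (m + 1) (by omega) (by omega)
      (E ++ (PySem.List.pyRange (m + 1) e 1).flatMap (fun j => [[m, j], [j, m]]))
      (fun a b => by
        rw [List.mem_append, hE a b, mem_pairs]
        omega)
    rw [hstep]
    simp [List.append_assoc]

-- B's staged construction (combinations list, then orientation expansion) is the
-- nested flatMap of the two-element orientation blocks.
lemma alt_eq_flatMap (s e : Int) :
    looping_aux_alt s e = (PySem.List.pyRange s e 1).flatMap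
      (fun i => (PySem.List.pyRange (i + 1) e 1).flatMap (fun j => [[i, j], [j, i]])) := by
  unfold looping_aux_alt
  simp [List.flatMap_assoc, List.flatMap_map]

-- ===== VERDICT (by name: the statement is the Claim_ definition above) =====
theorem looping_aux_spec : Claim_equal_looping_aux := by
  intro s e _
  unfold Spec_looping_aux looping_aux
  rw [alt_eq_flatMap]
  have := outer_eq s e (e - s).toNat s rfl le_rfl []
    (fun a b => by simp; omega)
  rw [this]
  simp
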